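-- pv_equiv track=rewrite | github.com/worldwidelaw/legal-sources | sources/EU/EMA/bootstrap.py | get_overview_doc_for_medicine
-- ===== SOURCE A (Python) =====
-- from typing import Generator, Optional, Dict, List
--
-- def get_overview_doc_for_medicine(medicine_name: str, doc_index: Dict[str, List[Dict]]) -> Optional[Dict]:
--     """Find the overview/summary document for a medicine."""
--     medicine_key = medicine_name.lower().strip()
--
--     docs = doc_index.get(medicine_key, [])
--     if not docs:
--         return None
--
--     # Prefer "overview" type (summary for public)
--     for doc in docs:
--         if doc.get('type') == 'overview':
--             return doc
--
--     # Fall back to scientific-discussion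
--     for doc in docs:
--         if doc.get('type') == 'scientific-discussion':
--             return doc
--
--     # Return first available
--     return docs[0] if docs else None
-- ===== SOURCE B (Python) =====
-- def _rank(doc):
--     """Preference rank of a document: overview best, scientific-discussion next, anything else last."""
--     t = doc.get('type')
--     if t == 'overview':
--         return 0
--     if t == 'scientific-discussion':
--         return 1
--     return 2
--
-- def get_overview_doc_for_medicine(medicine_name: str, doc_index):
--     """Find the overview/summary document for a medicine (rank + min)."""
--     docs = doc_index.get(medicine_name.lower().strip(), [])
--     if not docs:
--         return None
--     return min(docs, key=_rank)
-- ===== Notes on version B (the rewrite author's own statement) =====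
-- stated objective: simpler
-- what changed: Replaces A's staged scans (first for 'overview', then for 'scientific-discussion', then docs[0]) with a numeric preference rank per document and a single min(docs, key=rank), relying on min keeping the first minimal element.
import Mathlib
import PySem

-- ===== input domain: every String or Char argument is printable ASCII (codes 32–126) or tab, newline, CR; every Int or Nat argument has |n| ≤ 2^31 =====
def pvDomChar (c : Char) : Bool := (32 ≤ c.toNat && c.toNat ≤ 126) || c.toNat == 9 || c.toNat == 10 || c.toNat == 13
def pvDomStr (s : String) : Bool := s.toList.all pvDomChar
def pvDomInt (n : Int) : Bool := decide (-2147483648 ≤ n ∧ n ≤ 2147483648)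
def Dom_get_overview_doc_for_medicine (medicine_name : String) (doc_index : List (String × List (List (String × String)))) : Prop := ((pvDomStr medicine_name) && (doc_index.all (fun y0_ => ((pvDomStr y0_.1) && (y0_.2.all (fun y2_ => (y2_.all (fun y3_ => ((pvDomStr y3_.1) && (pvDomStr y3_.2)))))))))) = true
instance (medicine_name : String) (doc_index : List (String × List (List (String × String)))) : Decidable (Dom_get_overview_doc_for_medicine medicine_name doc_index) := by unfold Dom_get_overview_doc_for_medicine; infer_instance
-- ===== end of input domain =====

-- ===== PORT A =====
-- B replaces A's staged scans with a numeric preference rank per document and one min(docs, key=rank) (simpler decomposition, same cost).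
-- doc.get('type'): first-match lookup in the association list (dict semantics)
def pvGetType? (doc : List (String × String)) : Option String :=
  (PySem.Dict.mk doc).get? "type"

-- one of A's scan loops: return the first doc whose type == t
def pvFindType (t : String) : List (List (String × String)) → Option (List (String × String))
  | [] => none
  | d :: ds => if pvGetType? d = some t then some d else pvFindType t ds

def get_overview_doc_for_medicine (medicine_name : String) (doc_index : List (String × List (List (String × String)))) : Option (List (String × String)) :=
  let medicine_key := PySem.Str.strip (PySem.Str.lower medicine_name)
  let docs := (PySem.Dict.mk doc_index).getD medicine_key []
  if docs = [] then none
  else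
    match pvFindType "overview" docs with
    | some d => some d
    | none =>
      match pvFindType "scientific-discussion" docs with
      | some d => some d
      | none => docs.head?

-- ===== PORT B =====
-- _rank(doc): preference rank — overview 0, scientific-discussion 1, anything else 2
def pvRankB (doc : List (String × String)) : Nat :=
  let t := (PySem.Dict.mk doc).get? "type"
  if t = some "overview" then 0
  else if t = some "scientific-discussion" then 1
  else 2

def get_overview_doc_for_medicine_alt (medicine_name : String) (doc_index : List (String × List (List (String × String)))) : Option (List (String × String)) :=
  let docs := (PySem.Dict.mk doc_index).getD (PySem.Str.strip (PySem.Str.lower medicine_name)) []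
  if docs = [] then none
  else PySem.List.min? docs pvRankB   -- min(docs, key=_rank): first element of minimal rank

-- ===== PRECONDITION & SPEC =====
def Spec_get_overview_doc_for_medicine (medicine_name : String) (doc_index : List (String × List (List (String × String)))) (out : Option (List (String × String))) : Prop := out = get_overview_doc_for_medicine_alt medicine_name doc_index
instance (medicine_name : String) (doc_index : List (String × List (List (String × String)))) (out : Option (List (String × String))) : Decidable (Spec_get_overview_doc_for_medicine medicine_name doc_index out) := by unfold Spec_get_overview_doc_for_medicine; infer_instance

-- ===== CLAIM (what is proved, stated in full; the proofs are below) =====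
def Claim_equal_get_overview_doc_for_medicine : Prop := ∀ (medicine_name : String) (doc_index : List (String × List (List (String × String)))), Dom_get_overview_doc_for_medicine medicine_name doc_index → Spec_get_overview_doc_for_medicine medicine_name doc_index (get_overview_doc_for_medicine medicine_name doc_index)

-- ===== LEMMAS AND PROOFS =====
-- one fold step of min(docs, key=_rank): the running best absorbs the next element
theorem pvMin_step (m d : List (String × String)) (ds : List (List (String × String))) :
    PySem.List.min? (m :: d :: ds) pvRankB =
      PySem.List.min? ((if pvRankB d < pvRankB m then d else m) :: ds) pvRankB := by
  by_cases h : pvRankB d < pvRankB m <;> simp [PySem.List.min?, h]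

-- min-by-rank on a nonempty list = A's staged scans, stated with the head as the running best
theorem pvMin_eq (docs : List (List (String × String))) :
    ∀ m, PySem.List.min? (m :: docs) pvRankB =
      some (if pvRankB m = 0 then m
        else match pvFindType "overview" docs with
        | some d => d
        | none =>
          if pvRankB m = 1 then m
          else match pvFindType "scientific-discussion" docs with
            | some d => d
            | none => m) := by
  induction docs with
  | nil => intro m; simp [PySem.List.min?, pvFindType]
  | cons d ds ih =>
    intro m
    rw [pvMin_step, ih]
    by_cases hdo : pvGetType? d = some "overview" <;>
    by_cases hds : pvGetType? d = some "scientific-discussion" <;>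
    by_cases hmo : pvGetType? m = some "overview" <;>
    by_cases hms : pvGetType? m = some "scientific-discussion" <;>
      simp_all [pvRankB, pvGetType?, pvFindType]

-- both bodies agree for any docs list: min-by-rank = staged scans
theorem pvCore (docs : List (List (String × String))) :
    (if docs = [] then (none : Option (List (String × String)))
     else
       match pvFindType "overview" docs with
       | some d => some d
       | none =>
         match pvFindType "scientific-discussion" docs with
         | some d => some d
         | none => docs.head?) =
    (if docs = [] then none else PySem.List.min? docs pvRankB) := by
  cases docs with
  | nil => rfl
  | cons d0 rest =>
    simp only [List.cons_ne_nil, if_false, pvMin_eq]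
    by_cases h0 : pvGetType? d0 = some "overview" <;>
    by_cases h1 : pvGetType? d0 = some "scientific-discussion" <;>
      simp_all [pvRankB, pvGetType?, pvFindType] <;>
      cases pvFindType "overview" rest <;>
      cases pvFindType "scientific-discussion" rest <;>
      simp_all

-- ===== VERDICT (by name: the statement is the Claim_ definition above) =====
theorem get_overview_doc_for_medicine_spec : Claim_equal_get_overview_doc_for_medicine := by
  intro medicine_name doc_index _
  unfold Spec_get_overview_doc_for_medicine
  unfold get_overview_doc_for_medicine get_overview_doc_for_medicine_alt
  exact pvCore ((PySem.Dict.mk doc_index).getD (PySem.Str.strip (PySem.Str.lower medicine_name)) [])
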